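-- pv_equiv track=rewrite | github.com/Panharoth06/reffensive-backend | fastapi-gateway/app/dependencies/rbac.py | _normalize_required_roles
-- ===== SOURCE A (Python) =====
-- def _normalize_required_roles(roles: tuple[str, ...]) -> tuple[str, ...]:
--     return tuple(
--         sorted(
--             {
--                 role.strip().upper()
--                 for role in roles
--                 if isinstance(role, str) and role.strip()
--             }
--         )
--     )
-- ===== SOURCE B (Python) =====
-- def _normalize_required_roles(roles: tuple[str, ...]) -> tuple[str, ...]:
--     # Online insertion sort with dedup-on-insert: no set, no sort call.
--     result = []  # strictly sorted, duplicate-free at all times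
--     for role in roles:
--         if isinstance(role, str):
--             s = role.strip()
--             if s:
--                 r = s.upper()
--                 i = 0
--                 while i < len(result) and result[i] < r:
--                     i += 1
--                 if i == len(result) or result[i] != r:
--                     result.insert(i, r)
--     return tuple(result)
-- ===== Notes on version B (the rewrite author's own statement) =====
-- stated objective: alternative
-- what changed: Replaces hash-set dedup followed by a library sort with an online insertion sort: each normalized role is merged into a strictly sorted duplicate-free accumulator by a recursive sorted-insert that skips elements already present, so neither a set nor a sort call is used.
import Mathlib
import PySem

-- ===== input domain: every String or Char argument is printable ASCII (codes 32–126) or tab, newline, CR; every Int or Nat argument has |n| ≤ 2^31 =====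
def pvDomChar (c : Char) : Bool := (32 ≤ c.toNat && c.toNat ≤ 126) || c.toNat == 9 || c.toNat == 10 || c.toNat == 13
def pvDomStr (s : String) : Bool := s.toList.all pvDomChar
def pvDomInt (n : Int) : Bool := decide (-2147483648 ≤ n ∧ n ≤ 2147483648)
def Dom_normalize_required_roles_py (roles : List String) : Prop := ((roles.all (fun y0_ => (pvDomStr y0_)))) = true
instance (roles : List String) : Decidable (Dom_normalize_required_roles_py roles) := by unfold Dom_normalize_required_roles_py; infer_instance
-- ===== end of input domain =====

-- B replaces A's hash-set dedup + library sort by an online insertion sort with dedup-on-insert: alternative algorithm, no set, no sort call.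

-- ===== PORT A =====
-- set comprehension over roles in order, then sorted(); 'isinstance(role, str)' is always true for a List String input
def normalize_required_roles_py (roles : List String) : List String :=
  PySem.List.sorted
    (PySem.Set.ofList
      ((roles.filter (fun role => PySem.Str.strip role != "")).map
        (fun role => PySem.Str.upper (PySem.Str.strip role))))
    (fun x => x) false

-- ===== PORT B =====
-- the index while-loop + conditional list.insert of Source B, ported as structural
-- recursion on the scanned prefix (exact: same comparisons, same resulting list)
def pvInsertUnique (result : List String) (r : String) : List String :=
  match result with
  | [] => [r]
  | x :: xs => if x < r then x :: pvInsertUnique xs r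
               else if x = r then x :: xs
               else r :: x :: xs

def normalize_required_roles_py_alt (roles : List String) : List String :=
  roles.foldl
    (fun result role =>
      if PySem.Str.strip role != "" then
        pvInsertUnique result (PySem.Str.upper (PySem.Str.strip role))
      else result)
    []

-- ===== PRECONDITION & SPEC =====
def Spec_normalize_required_roles_py (roles : List String) (out : List String) : Prop := out = normalize_required_roles_py_alt roles
instance (roles : List String) (out : List String) : Decidable (Spec_normalize_required_roles_py roles out) := by unfold Spec_normalize_required_roles_py; infer_instance

-- ===== CLAIM (what is proved, stated in full; the proofs are below) =====
def Claim_equal_normalize_required_roles_py : Prop := ∀ (roles : List String), Dom_normalize_required_roles_py roles → Spec_normalize_required_roles_py roles (normalize_required_roles_py roles)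

-- ===== LEMMAS AND PROOFS =====

theorem pv_mem_insertUnique (l : List String) (r a : String) :
    a ∈ pvInsertUnique l r ↔ a ∈ l ∨ a = r := by
  induction l with
  | nil => simp [pvInsertUnique]
  | cons x xs ih =>
    simp only [pvInsertUnique]
    split_ifs with h1 h2
    · simp [ih]; tauto
    · subst h2; simp; tauto
    · simp; tauto

theorem pv_pairwise_insertUnique (l : List String) (r : String)
    (h : l.Pairwise (· < ·)) : (pvInsertUnique l r).Pairwise (· < ·) := by
  induction l with
  | nil => simp [pvInsertUnique]
  | cons x xs ih =>
    rw [List.pairwise_cons] at h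
    simp only [pvInsertUnique]
    split_ifs with h1 h2
    · rw [List.pairwise_cons]
      refine ⟨?_, ih h.2⟩
      intro a ha
      rcases (pv_mem_insertUnique xs r a).1 ha with hx | hx
      · exact h.1 a hx
      · exact hx ▸ h1
    · exact List.pairwise_cons.2 h
    · have hrx : r < x := lt_of_le_of_ne (not_lt.1 h1) (fun e => h2 e.symm)
      rw [List.pairwise_cons]
      refine ⟨?_, List.pairwise_cons.2 h⟩
      intro a ha
      rcases List.mem_cons.1 ha with hx | hx
      · exact hx ▸ hrx
      · exact lt_trans hrx (h.1 a hx)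

-- the foldl over roles equals the foldl of pvInsertUnique over the filtered-and-mapped list
theorem pv_foldl_filter_map (roles : List String) (acc : List String) :
    roles.foldl
      (fun result role =>
        if PySem.Str.strip role != "" then
          pvInsertUnique result (PySem.Str.upper (PySem.Str.strip role))
        else result)
      acc
    = ((roles.filter (fun role => PySem.Str.strip role != "")).map
        (fun role => PySem.Str.upper (PySem.Str.strip role))).foldl pvInsertUnique acc := by
  induction roles generalizing acc with
  | nil => rfl
  | cons x xs ih =>
    simp only [List.foldl_cons, List.filter_cons]
    by_cases h : (PySem.Str.strip x != "") = true
    · rw [if_pos h, if_pos h]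
      simp only [List.map_cons, List.foldl_cons]
      exact ih _
    · rw [if_neg h, if_neg h]
      exact ih _

-- invariant of the foldl: accumulator stays strictly sorted, members accumulate
theorem pv_foldl_inv (L acc : List String) (h : acc.Pairwise (· < ·)) :
    (L.foldl pvInsertUnique acc).Pairwise (· < ·) ∧
    (∀ a, a ∈ L.foldl pvInsertUnique acc ↔ a ∈ acc ∨ a ∈ L) := by
  induction L generalizing acc with
  | nil => exact ⟨h, fun a => by simp⟩
  | cons x xs ih =>
    simp only [List.foldl_cons]
    obtain ⟨hp, hm⟩ := ih (pvInsertUnique acc x) (pv_pairwise_insertUnique acc x h)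
    refine ⟨hp, fun a => ?_⟩
    rw [hm a, pv_mem_insertUnique]
    simp; tauto

theorem pv_main (L : List String) :
    PySem.List.sorted (PySem.Set.ofList L) (fun x => x) false
      = L.foldl pvInsertUnique [] := by
  obtain ⟨hp, hm⟩ := pv_foldl_inv L [] (by simp)
  apply PySem.List.sorted_eq_of_perm_of_pairwise_lt
  · have hnd : (L.foldl pvInsertUnique []).Nodup := List.Pairwise.imp ne_of_lt hp
    rw [List.perm_ext_iff_of_nodup hnd (PySem.Set.nodup_ofList L)]
    intro a
    rw [hm a, PySem.Set.mem_ofList]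
    simp
  · simpa using hp

-- ===== VERDICT (by name: the statement is the Claim_ definition above) =====
theorem normalize_required_roles_py_spec : Claim_equal_normalize_required_roles_py := by
  intro roles _
  unfold Spec_normalize_required_roles_py normalize_required_roles_py normalize_required_roles_py_alt
  rw [pv_foldl_filter_map]
  exact pv_main _
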